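-- pv_equiv track=rewrite | github.com/kanoria/Honeyword-decoder | classifier.py | isInSequence
-- ===== SOURCE A (Python) =====
-- def isInSequence(word):
--     """
--     Checks if the string passed is a sequence of digits logically connected ("e.g. 369")
--     """
--     if len(word)<3:
--         return False
--     else:
--         increment = int(word[0]) - int(word[1])
--         for i in range(len(word) - 2):
--             if int(word[i+1]) - int(word[i+2]) != increment:
--                 return False
--         return True
-- ===== SOURCE B (Python) =====
-- def isInSequence(word):
--     """
--     Checks if the string passed is a sequence of digits logically connected ("e.g. 369")
--     """
--     if len(word) < 3:
--         return False
--     diffs = {int(word[i]) - int(word[i + 1]) for i in range(len(word) - 1)}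
--     return len(diffs) == 1
-- ===== Notes on version B (the rewrite author's own statement) =====
-- stated objective: idiomatic
-- what changed: Replaces the early-exit scan comparing each adjacent digit difference against the first one with a two-phase computation that collects the set of all consecutive digit differences and tests that the set is a singleton.
-- outside the precondition, e.g. on isInSequence('124x'): A returns False, B raises ValueError
import Mathlib
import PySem

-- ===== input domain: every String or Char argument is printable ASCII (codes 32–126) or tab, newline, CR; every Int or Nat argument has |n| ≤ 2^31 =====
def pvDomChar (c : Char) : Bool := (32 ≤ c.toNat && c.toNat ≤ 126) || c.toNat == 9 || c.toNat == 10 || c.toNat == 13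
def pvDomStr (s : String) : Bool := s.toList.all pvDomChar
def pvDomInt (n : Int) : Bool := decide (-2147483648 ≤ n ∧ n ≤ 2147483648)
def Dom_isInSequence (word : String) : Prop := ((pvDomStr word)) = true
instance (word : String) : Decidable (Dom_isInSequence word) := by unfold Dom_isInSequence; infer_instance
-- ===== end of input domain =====

-- B is the same task written idiomatically: collect the set of all consecutive digit
-- differences, then test that the set is a singleton (no early exit, no tracked increment).

-- shared helpers: word[i] (index provably in range wherever the ports use it) and int(c)
-- (exact for digit characters; Pre_ excludes the inputs where Python's int() raises ValueError)
def pyCharAt (word : String) (i : Int) : Char := (PySem.Str.pyGet? word i).getD ' '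
def pyIntChar (c : Char) : Int := (PySem.Int.ofChars? [c]).getD 0

-- ===== PORT A =====
-- the for-loop with its early 'return False', as structural recursion over range(len(word)-2)
def isInSequenceLoop (word : String) (increment : Int) : List Int → Bool
  | [] => true
  | i :: rest =>
    if pyIntChar (pyCharAt word (i + 1)) - pyIntChar (pyCharAt word (i + 2)) ≠ increment then
      false
    else
      isInSequenceLoop word increment rest

def isInSequence (word : String) : Bool :=
  if PySem.Str.len word < 3 then false
  else
    let increment := pyIntChar (pyCharAt word 0) - pyIntChar (pyCharAt word 1)
    isInSequenceLoop word increment (PySem.List.pyRange 0 (PySem.Str.len word - 2) 1)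

-- ===== PORT B =====
def isInSequence_alt (word : String) : Bool :=
  if PySem.Str.len word < 3 then false
  else
    let diffs : PySem.Set Int :=
      PySem.Set.ofList ((PySem.List.pyRange 0 (PySem.Str.len word - 1) 1).map
        (fun i => pyIntChar (pyCharAt word i) - pyIntChar (pyCharAt word (i + 1))))
    PySem.Set.len diffs == 1

-- ===== PRECONDITION & SPEC =====
-- Pre_ excludes strings of length ≥ 3 containing a non-digit character: Python A raises
-- ValueError on them except when an earlier difference mismatch makes A return False before
-- reading the non-digit, where B still raises.
def Pre_isInSequence (word : String) : Prop :=
  word.toList.length < 3 ∨ word.toList.all (fun c => PySem.Chars.isdigit c) = true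
instance (word : String) : Decidable (Pre_isInSequence word) := by
  unfold Pre_isInSequence; infer_instance

def pvWitness_isInSequence : String := "135"

def Spec_isInSequence (word : String) (out : Bool) : Prop := out = isInSequence_alt word
instance (word : String) (out : Bool) : Decidable (Spec_isInSequence word out) := by unfold Spec_isInSequence; infer_instance

-- ===== CLAIM (what is proved, stated in full; the proofs are below) =====
def Claim_equal_isInSequence : Prop := ∀ (word : String), Dom_isInSequence word → Pre_isInSequence word → Spec_isInSequence word (isInSequence word)

-- ===== LEMMAS AND PROOFS =====

-- the adjacent difference at index i
def diffAt (word : String) (i : Int) : Int :=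
  pyIntChar (pyCharAt word i) - pyIntChar (pyCharAt word (i + 1))

-- A's loop succeeds iff every checked difference equals the increment
theorem loopA_iff (word : String) (inc : Int) (k : Nat) :
    ∀ a b : Int, (b - a).toNat = k →
      (isInSequenceLoop word inc (PySem.List.pyRange a b 1) = true ↔
        ∀ i : Int, a ≤ i → i < b → diffAt word (i + 1) = inc) := by
  induction k with
  | zero =>
    intro a b hk
    rw [PySem.List.pyRange_one_eq_nil (by omega)]
    simp only [isInSequenceLoop, true_iff]
    intro i h1 h2; omega
  | succ m ih =>
    intro a b hk
    have hab : a < b := by omega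
    have hda : diffAt word (a + 1) =
        pyIntChar (pyCharAt word (a + 1)) - pyIntChar (pyCharAt word (a + 2)) := by
      unfold diffAt; rw [show a + 1 + 1 = a + 2 from by ring]
    rw [PySem.List.pyRange_one_cons hab]
    simp only [isInSequenceLoop]
    split_ifs with hne
    · simp only [false_iff]
      intro hall
      exact hne (hda ▸ hall a le_rfl hab)
    · rw [ih (a + 1) b (by omega)]
      constructor
      · intro hall i h1 h2
        rcases eq_or_lt_of_le h1 with rfl | hlt
        · exact hda.trans (not_not.mp (fun hx => hne hx))
        · exact hall i (by omega) h2
      · intro hall i h1 h2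
        exact hall i (by omega) h2

-- a Python set built from a list is a singleton iff the list is nonempty and constant
theorem setLen_one_iff {L : List Int} :
    (PySem.Set.ofList L).length = 1 ↔ ∃ a, a ∈ L ∧ ∀ x ∈ L, x = a := by
  constructor
  · intro h
    rcases List.length_eq_one_iff.mp h with ⟨a, ha⟩
    refine ⟨a, ?_, ?_⟩
    · have : a ∈ PySem.Set.ofList L := by rw [ha]; exact List.mem_singleton.mpr rfl
      exact (PySem.Set.mem_ofList _ _).mp this
    · intro x hx
      have : x ∈ PySem.Set.ofList L := (PySem.Set.mem_ofList _ _).mpr hx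
      rw [ha] at this
      exact List.mem_singleton.mp this
  · rintro ⟨a, haL, hall⟩
    have hmem : a ∈ PySem.Set.ofList L := (PySem.Set.mem_ofList _ _).mpr haL
    have hsub : ∀ x ∈ PySem.Set.ofList L, x = a := fun x hx =>
      hall x ((PySem.Set.mem_ofList _ _).mp hx)
    have hnd : (PySem.Set.ofList L).Nodup := PySem.Set.nodup_ofList L
    match hL : PySem.Set.ofList L with
    | [] => rw [hL] at hmem; cases hmem
    | [x] => rfl
    | x :: y :: t =>
      rw [hL] at hsub hnd
      have hx := hsub x (by simp)
      have hy := hsub y (by simp)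
      subst hx; subst hy
      simp at hnd

theorem mem_diffList (word : String) (n : Int) (x : Int) :
    x ∈ (PySem.List.pyRange 0 (n - 1) 1).map
        (fun i => pyIntChar (pyCharAt word i) - pyIntChar (pyCharAt word (i + 1))) ↔
      ∃ i : Int, 0 ≤ i ∧ i < n - 1 ∧ x = diffAt word i := by
  simp only [List.mem_map, PySem.List.mem_pyRange_one, diffAt]
  constructor
  · rintro ⟨i, ⟨h1, h2⟩, rfl⟩; exact ⟨i, h1, h2, rfl⟩
  · rintro ⟨i, h1, h2, rfl⟩; exact ⟨i, ⟨h1, h2⟩, rfl⟩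

-- ===== VERDICT (by name: the statement is the Claim_ definition above) =====
theorem isInSequence_spec : Claim_equal_isInSequence := by
  intro word _ _
  unfold Spec_isInSequence isInSequence isInSequence_alt
  split_ifs with h
  · rfl
  · push Not at h
    set n := PySem.Str.len word with hn
    have hinc : pyIntChar (pyCharAt word 0) - pyIntChar (pyCharAt word 1) = diffAt word 0 := by
      norm_num [diffAt]
    rw [hinc, Bool.eq_iff_iff, loopA_iff word _ (n - 2 - 0).toNat 0 (n - 2) rfl]
    simp only [beq_iff_eq, PySem.Set.len, Nat.cast_eq_one]
    rw [setLen_one_iff]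
    constructor
    · intro hall
      refine ⟨diffAt word 0, (mem_diffList word n _).mpr ⟨0, le_rfl, by omega, rfl⟩, ?_⟩
      intro x hx
      rcases (mem_diffList word n x).mp hx with ⟨i, h1, h2, rfl⟩
      rcases eq_or_lt_of_le h1 with rfl | hpos
      · rfl
      · have := hall (i - 1) (by omega) (by omega)
        simpa [show i - 1 + 1 = i by omega] using this
    · rintro ⟨a, haL, hall⟩
      have h0 : diffAt word 0 = a :=
        hall _ ((mem_diffList word n _).mpr ⟨0, le_rfl, by omega, rfl⟩)
      intro i h1 h2
      have := hall _ ((mem_diffList word n _).mpr ⟨i + 1, by omega, by omega, rfl⟩)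
      rw [this, h0]
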